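-- pv_equiv track=rewrite | github.com/koenvdpool/python-for-text-analysis | Assignments/ted_translation_analysis.py | map_nlang_to_talks
-- ===== SOURCE A (Python) =====
-- def map_nlang_to_talks(talk_id_to_lang, /):
--     """
--     Maps the number of translations to their corresponding talk IDs.
--
--     :param talk_id_to_lang: a dict with a ID-to-language mapping
--     :return: a number of translations to talk IDs mapping
--     """
--     # Create a dictionary mapping translation counts to talk IDs.
--     nlang_to_talk_ids = {}
--
--     for talk_id, list_of_lang in talk_id_to_lang.items():
--         # Get number of translations for each talk
--         n_translations = len(list_of_lang)
--         # Add empty list for talk IDs if translation count is not in the dictionary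
--         if n_translations not in nlang_to_talk_ids:
--             nlang_to_talk_ids[n_translations] = []
--         # Add number of translations to talk ID mapping to the dict
--         nlang_to_talk_ids[n_translations].append(talk_id)
--
--     return nlang_to_talk_ids
-- ===== SOURCE B (Python) =====
-- def map_nlang_to_talks(talk_id_to_lang, /):
--     """
--     Maps the number of translations to their corresponding talk IDs.
--
--     :param talk_id_to_lang: a dict with a ID-to-language mapping
--     :return: a number of translations to talk IDs mapping
--     """
--     # Distinct translation counts in first-encounter order, then one
--     # filtering pass per count collecting the talk IDs with that count.
--     counts = dict.fromkeys(len(langs) for langs in talk_id_to_lang.values())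
--     return {c: [tid for tid, langs in talk_id_to_lang.items() if len(langs) == c]
--             for c in counts}
-- ===== Notes on version B (the rewrite author's own statement) =====
-- stated objective: alternative
-- what changed: Instead of one pass that appends each talk ID into an incrementally grown dict of lists, B first dedups the translation counts in encounter order and then builds each group with a separate comprehension filtering the items by that count.
import Mathlib
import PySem

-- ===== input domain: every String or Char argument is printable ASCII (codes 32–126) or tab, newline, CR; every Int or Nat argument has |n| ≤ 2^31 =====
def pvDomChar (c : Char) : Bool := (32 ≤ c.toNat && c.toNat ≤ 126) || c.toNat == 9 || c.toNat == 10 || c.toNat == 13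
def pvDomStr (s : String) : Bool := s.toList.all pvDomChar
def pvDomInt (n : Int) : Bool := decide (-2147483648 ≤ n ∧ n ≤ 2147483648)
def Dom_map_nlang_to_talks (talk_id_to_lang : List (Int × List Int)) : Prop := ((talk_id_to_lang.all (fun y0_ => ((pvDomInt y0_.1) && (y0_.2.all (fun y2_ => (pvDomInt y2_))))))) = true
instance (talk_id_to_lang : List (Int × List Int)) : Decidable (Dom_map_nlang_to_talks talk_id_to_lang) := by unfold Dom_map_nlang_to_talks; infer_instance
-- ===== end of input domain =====

-- B replaces A's single pass growing a dict of lists by an encounter-order dedup of the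
-- translation counts followed by one filtering pass per distinct count (alternative decomposition).


-- ===== PORT A =====
-- A: one pass; 'if n not in d: d[n] = []' is dict.setdefault, 'd[n].append(talk_id)' is
-- Dict.modify (d[n] = d.get(n, []) + [talk_id] on a now-present key).
def map_nlang_to_talks (talk_id_to_lang : List (Int × List Int)) : List (Int × List Int) :=
  (talk_id_to_lang.foldl
    (fun nlang_to_talk_ids pair =>
      (nlang_to_talk_ids.setdefault ((pair.2.length : Int)) []).modify ((pair.2.length : Int)) []
        (· ++ [pair.1]))
    PySem.Dict.empty).items

-- ===== PORT B =====
-- B: dict.fromkeys over the counts (ordered dedup), then one filter per distinct count.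
def map_nlang_to_talks_alt (talk_id_to_lang : List (Int × List Int)) : List (Int × List Int) :=
  let counts := PySem.List.dedup (talk_id_to_lang.map (fun pair => (pair.2.length : Int)))
  counts.map (fun c =>
    (c, (talk_id_to_lang.filter (fun pair => (pair.2.length : Int) == c)).map (·.1)))

-- ===== PRECONDITION & SPEC =====
def Spec_map_nlang_to_talks (talk_id_to_lang : List (Int × List Int)) (out : List (Int × List Int)) : Prop := out = map_nlang_to_talks_alt talk_id_to_lang
instance (talk_id_to_lang : List (Int × List Int)) (out : List (Int × List Int)) : Decidable (Spec_map_nlang_to_talks talk_id_to_lang out) := by unfold Spec_map_nlang_to_talks; infer_instance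

-- ===== CLAIM (what is proved, stated in full; the proofs are below) =====
def Claim_equal_map_nlang_to_talks : Prop := ∀ (talk_id_to_lang : List (Int × List Int)), Dom_map_nlang_to_talks talk_id_to_lang → Spec_map_nlang_to_talks talk_id_to_lang (map_nlang_to_talks talk_id_to_lang)

-- ===== LEMMAS AND PROOFS =====

-- setdefault k [] followed by an in-place append at k is exactly Dict.modify at k.
theorem setdefault_modify_eq_modify {κ ν : Type} [BEq κ] [LawfulBEq κ]
    (d : PySem.Dict κ ν) (k : κ) (v : ν) (f : ν → ν) :
    (d.setdefault k v).modify k v f = d.modify k v f := by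
  by_cases h : d.contains k = true
  · rw [PySem.Dict.setdefault_of_contains d v h]
  · have h' : d.contains k = false := by simpa using h
    rw [PySem.Dict.setdefault_of_not_contains d v h']
    simp [PySem.Dict.modify, PySem.Dict.getD_insert_self, PySem.Dict.insert_insert_self,
      PySem.Dict.getD_of_not_contains d v h']

theorem map_nlang_key_thm (l : List (Int × List Int)) :
    map_nlang_to_talks l = map_nlang_to_talks_alt l := by
  unfold map_nlang_to_talks map_nlang_to_talks_alt
  have hstep :
      (fun (d : PySem.Dict Int (List Int)) (pair : Int × List Int) =>
          (d.setdefault ((pair.2.length : Int)) []).modify ((pair.2.length : Int)) []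
            (· ++ [pair.1]))
        = fun d pair => d.modify ((pair.2.length : Int)) [] (· ++ [pair.1]) := by
    funext d pair
    exact setdefault_modify_eq_modify d _ [] _
  rw [hstep]
  set D := l.foldl (fun d pair => d.modify ((pair.2.length : Int)) [] (· ++ [pair.1]))
    PySem.Dict.empty with hD
  have hkeys : D.keys = PySem.List.dedup (l.map (fun pair => (pair.2.length : Int))) := by
    rw [hD, PySem.Dict.keys_foldl_modify_key l (fun pair => (pair.2.length : Int)) []
      (fun _ pair => (· ++ [pair.1])) PySem.Dict.empty]
    rfl
  have hnodup : D.keys.Nodup := by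
    rw [hD]
    exact PySem.Dict.nodup_keys_foldl_modify_key l (fun pair => (pair.2.length : Int)) []
      (fun _ pair => (· ++ [pair.1])) PySem.Dict.empty (by simp [pysem])
  have hgetD : ∀ c : Int, D.getD c []
      = (l.filter (fun pair => (pair.2.length : Int) == c)).map (·.1) := by
    intro c
    have hmap : D = (l.map (fun pair => ((pair.2.length : Int), pair.1))).foldl
        (fun d q => d.modify q.1 [] (· ++ [q.2])) PySem.Dict.empty := by
      rw [hD, List.foldl_map]
    rw [hmap, PySem.Dict.getD_foldl_modify_append]
    simp [List.filter_map, Function.comp_def]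
  rw [PySem.Dict.items_eq_map_keys D hnodup [], hkeys]
  exact List.map_congr_left (fun c _ => by rw [hgetD c])

-- ===== VERDICT (by name: the statement is the Claim_ definition above) =====
theorem map_nlang_to_talks_spec : Claim_equal_map_nlang_to_talks := by
  intro l _
  unfold Spec_map_nlang_to_talks
  exact map_nlang_key_thm l
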